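-- pv_equiv track=rewrite | github.com/daniel-reich/ubiquitous-fiesta | 9fbbjaLt22Zfvjjau_13.py | paul_cipher
-- ===== SOURCE A (Python) =====
-- def paul_cipher(txt):
--   prev = None
--   fin = ''
--   for char in txt:
--     if char.isalpha():
--       new = ord(char.upper())-65
--       if prev:
--         new+=ord(prev)-64
--       prev = char.upper()
--       fin+=chr((new%26)+65)
--     else:
--       fin+=char
--   return fin
-- ===== SOURCE B (Python) =====
-- def paul_cipher(txt):
--     letters = [c for c in txt if c.isalpha()]
--     enc = []
--     if letters:
--         enc.append(chr((ord(letters[0].upper()) - 65) % 26 + 65))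
--         for p, c in zip(letters, letters[1:]):
--             enc.append(chr((ord(c.upper()) - 65 + ord(p.upper()) - 64) % 26 + 65))
--     it = iter(enc)
--     return ''.join(next(it) if c.isalpha() else c for c in txt)
-- ===== Notes on version B (the rewrite author's own statement) =====
-- stated objective: alternative
-- what changed: B pairs each alphabetic character with its predecessor via zip over the extracted letter list (no threaded prev state), encodes them in one map-like pass, then merges the encoded letters back over the original text.
import Mathlib
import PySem

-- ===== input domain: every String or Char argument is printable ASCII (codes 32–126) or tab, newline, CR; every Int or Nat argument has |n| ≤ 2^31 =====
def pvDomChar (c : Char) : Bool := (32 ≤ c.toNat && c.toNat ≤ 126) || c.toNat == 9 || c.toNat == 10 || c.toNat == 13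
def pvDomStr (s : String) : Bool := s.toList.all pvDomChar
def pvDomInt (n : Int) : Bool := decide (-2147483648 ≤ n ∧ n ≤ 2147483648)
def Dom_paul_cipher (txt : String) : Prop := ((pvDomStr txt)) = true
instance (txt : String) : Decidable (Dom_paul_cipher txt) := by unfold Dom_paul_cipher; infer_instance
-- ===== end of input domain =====

-- B replaces A's branched loop threading a running `prev` by: extract the letters, encode each
-- letter paired with its predecessor (zip), then merge the encoded letters back over the text.
-- Objective: alternative decomposition; return value only (no mutation in either version).

-- ===== PORT A =====
-- A's loop: state (prev, fin); prev holds the upper-cased last alphabetic char (None initially;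
-- a one-char string is always truthy, so `if prev:` is `prev is not None`).
def paulStepA (st : Option Char × List Char) (c : Char) : Option Char × List Char :=
  if PySem.Chars.isalpha c then
    let new : Int := ((PySem.Chars.upperChar c).toNat : Int) - 65
    let new : Int := match st.1 with
      | some p => new + ((p.toNat : Int) - 64)
      | none => new
    (some (PySem.Chars.upperChar c),
      st.2 ++ [Char.ofNat (PySem.Int.mod new 26 + 65).toNat])
  else
    (st.1, st.2 ++ [c])

def paul_cipher (txt : String) : String :=
  String.mk (txt.toList.foldl paulStepA (none, [])).2

-- ===== PORT B =====
-- chr((ord(letters[0].upper()) - 65) % 26 + 65)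
def paulEnc1 (c : Char) : Char :=
  Char.ofNat (PySem.Int.mod (((PySem.Chars.upperChar c).toNat : Int) - 65) 26 + 65).toNat

-- chr((ord(c.upper()) - 65 + ord(p.upper()) - 64) % 26 + 65)
def paulEnc2 (p c : Char) : Char :=
  Char.ofNat (PySem.Int.mod (((PySem.Chars.upperChar c).toNat : Int) - 65
      + ((PySem.Chars.upperChar p).toNat : Int) - 64) 26 + 65).toNat

-- the final join: copy non-alpha chars, consume the next encoded letter for each alpha char
def paulMerge : List Char → List Char → List Char
  | [], _ => []
  | c :: cs, enc =>
    if PySem.Chars.isalpha c then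
      match enc with
      | e :: es => e :: paulMerge cs es
      | [] => []          -- unreachable: enc has one entry per alphabetic char
    else
      c :: paulMerge cs enc

def paul_cipher_alt (txt : String) : String :=
  let letters := txt.toList.filter PySem.Chars.isalpha
  let enc : List Char :=
    match letters with
    | [] => []
    | l0 :: rest => paulEnc1 l0 :: (letters.zip rest).map (fun pc => paulEnc2 pc.1 pc.2)
  String.mk (paulMerge txt.toList enc)

-- ===== PRECONDITION & SPEC =====
def Spec_paul_cipher (txt : String) (out : String) : Prop := out = paul_cipher_alt txt
instance (txt : String) (out : String) : Decidable (Spec_paul_cipher txt out) := by unfold Spec_paul_cipher; infer_instance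

-- ===== CLAIM (what is proved, stated in full; the proofs are below) =====
def Claim_equal_paul_cipher : Prop := ∀ (txt : String), Dom_paul_cipher txt → Spec_paul_cipher txt (paul_cipher txt)

-- ===== LEMMAS AND PROOFS =====

-- the encoded-letter stream A produces, starting from stored state p? (upper-cased prev or none)
def paulEncFromA : Option Char → List Char → List Char
  | _, [] => []
  | p?, c :: cs =>
    (match p? with
     | none => paulEnc1 c
     | some p => Char.ofNat (PySem.Int.mod (((PySem.Chars.upperChar c).toNat : Int) - 65
          + ((p.toNat : Int) - 64)) 26 + 65).toNat)
    :: paulEncFromA (some (PySem.Chars.upperChar c)) cs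

-- A's fold, from any state, appends exactly the merge of the text with its encoded-letter stream
theorem paulFold_eq_merge (cs : List Char) : ∀ (p? : Option Char) (fin : List Char),
    (cs.foldl paulStepA (p?, fin)).2
      = fin ++ paulMerge cs (paulEncFromA p? (cs.filter PySem.Chars.isalpha)) := by
  induction cs with
  | nil => intro p? fin; simp [paulMerge]
  | cons c cs ih =>
    intro p? fin
    by_cases h : PySem.Chars.isalpha c
    · cases p? <;>
        simp [List.foldl_cons, paulStepA, h, paulEncFromA, paulMerge, ih, paulEnc1]
    · simp [List.foldl_cons, paulStepA, h, paulMerge, ih]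

-- A's stream from a stored upper-cased prev is B's zip-with-predecessor encoding
theorem paulEncFromA_some (ls : List Char) : ∀ (p : Char),
    paulEncFromA (some (PySem.Chars.upperChar p)) ls
      = ((p :: ls).zip ls).map (fun pc => paulEnc2 pc.1 pc.2) := by
  induction ls with
  | nil => intro p; simp [paulEncFromA]
  | cons c cs ih =>
    intro p
    simp only [paulEncFromA, List.zip_cons_cons, List.map_cons, ih c]
    refine congrArg₂ _ ?_ rfl
    simp [paulEnc2]; ring_nf

-- A's stream from the initial state is exactly B's enc list
theorem paulEncFromA_none (ls : List Char) :
    paulEncFromA none ls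
      = match ls with
        | [] => []
        | l0 :: rest => paulEnc1 l0 :: (ls.zip rest).map (fun pc => paulEnc2 pc.1 pc.2) := by
  cases ls with
  | nil => rfl
  | cons l0 rest =>
    simp only [paulEncFromA, paulEncFromA_some rest l0]

-- ===== VERDICT (by name: the statement is the Claim_ definition above) =====
theorem paul_cipher_spec : Claim_equal_paul_cipher := by
  intro txt _
  unfold Spec_paul_cipher paul_cipher paul_cipher_alt
  rw [paulFold_eq_merge, paulEncFromA_none]
  rfl
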